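-- pv_equiv track=rewrite | github.com/tusharnandy/MLProjects | RecEng/cosine_similarity_self.py | vectorize_words
-- ===== SOURCE A (Python) =====
-- def vectorize_words(text):
--     text_split = [i.split(" ") for i in text]
--
--     unique = []
--
--     for sentence in text_split:
--         for word in sentence:
--             if word not in unique:
--                 unique.append(word)
--
--     vec_dim = len(unique)
--
--     vectors = []
--
--     for sentence in text_split:
--         coordinates = [0]*vec_dim
--         for word in sentence:
--             for i in range(len(unique)):
--                 if word == unique[i]:
--                     coordinates[i] += 1
--         vectors.append(coordinates)
--
--     return vectors
-- ===== SOURCE B (Python) =====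
-- def vectorize_words(text):
--     text_split = [i.split(" ") for i in text]
--
--     unique = []
--     seen = set()
--     for sentence in text_split:
--         for word in sentence:
--             if word not in seen:
--                 unique.append(word)
--                 seen.add(word)
--
--     vectors = []
--     for sentence in text_split:
--         counts = {}
--         for word in sentence:
--             counts[word] = counts.get(word, 0) + 1
--         vectors.append([counts.get(w, 0) for w in unique])
--     return vectors
-- ===== Notes on version B (the rewrite author's own statement) =====
-- stated objective: alternative
-- what changed: Vocabulary membership uses a seen-set instead of rescanning the unique list, and each sentence vector is built by projecting a precomputed per-sentence frequency dict onto the vocabulary instead of A's nested words-times-vocabulary counting scan.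
import Mathlib
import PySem

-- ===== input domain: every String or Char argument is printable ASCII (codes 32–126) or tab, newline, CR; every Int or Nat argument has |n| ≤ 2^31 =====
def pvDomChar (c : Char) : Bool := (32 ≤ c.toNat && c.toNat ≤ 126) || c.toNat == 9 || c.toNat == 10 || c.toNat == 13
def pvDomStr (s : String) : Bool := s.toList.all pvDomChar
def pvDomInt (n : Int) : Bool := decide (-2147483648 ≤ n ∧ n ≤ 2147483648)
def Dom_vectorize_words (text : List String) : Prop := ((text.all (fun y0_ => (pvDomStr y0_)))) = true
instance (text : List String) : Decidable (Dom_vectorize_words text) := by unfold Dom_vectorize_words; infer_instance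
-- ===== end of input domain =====

-- B tracks seen words in a set while building the vocabulary and builds each vector by projecting
-- a per-sentence frequency dict onto the vocabulary, instead of A's list scans; same return value,
-- different traversal structure (no speed claim).

-- ===== PORT A =====
def vectorize_words (text : List String) : List (List Int) :=
  let text_split := text.map (fun i => (PySem.Str.split? i " ").getD [])
  let unique := text_split.foldl (fun u sentence =>
    sentence.foldl (fun u word => if word ∈ u then u else u ++ [word]) u) []
  let vec_dim := unique.length
  text_split.foldl (fun vectors sentence =>
    let coordinates := List.replicate vec_dim (0 : Int)
    let coordinates := sentence.foldl (fun coords word =>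
      (PySem.List.pyRange 0 (unique.length : Int) 1).foldl (fun coords i =>
        if word = PySem.List.pyGetD unique i "" then
          PySem.List.pySetD coords i (PySem.List.pyGetD coords i 0 + 1)
        else coords) coords) coordinates
    vectors ++ [coordinates]) []

-- ===== PORT B =====
def vectorize_words_alt (text : List String) : List (List Int) :=
  let text_split := text.map (fun i => (PySem.Str.split? i " ").getD [])
  let p := text_split.foldl (fun p sentence =>
    sentence.foldl (fun p word =>
      if PySem.Set.contains p.2 word then p
      else (p.1 ++ [word], PySem.Set.add p.2 word)) p)
    (([] : List String), (PySem.Set.empty : PySem.Set String))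
  let unique := p.1
  text_split.foldl (fun vectors sentence =>
    let counts := sentence.foldl (fun d word =>
      PySem.Dict.modify d word 0 (· + 1)) (PySem.Dict.empty : PySem.Dict String Int)
    vectors ++ [unique.map (fun w => PySem.Dict.getD counts w 0)]) []

-- ===== PRECONDITION & SPEC =====
def Spec_vectorize_words (text : List String) (out : List (List Int)) : Prop := out = vectorize_words_alt text
instance (text : List String) (out : List (List Int)) : Decidable (Spec_vectorize_words text out) := by unfold Spec_vectorize_words; infer_instance

-- ===== CLAIM (what is proved, stated in full; the proofs are below) =====
def Claim_equal_vectorize_words : Prop := ∀ (text : List String), Dom_vectorize_words text → Spec_vectorize_words text (vectorize_words text)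

-- ===== LEMMAS AND PROOFS =====

-- length is preserved by A's inner index loop
theorem lenA (word : String) (unique : List String) :
    ∀ (idxs : List Int) (coords : List Int),
      (idxs.foldl (fun coords i =>
        if word = PySem.List.pyGetD unique i "" then
          PySem.List.pySetD coords i (PySem.List.pyGetD coords i 0 + 1)
        else coords) coords).length = coords.length := by
  intro idxs
  induction idxs with
  | nil => intro coords; rfl
  | cons i is ih =>
    intro coords
    simp only [List.foldl_cons]
    rw [ih]
    split_ifs <;> simp [PySem.List.length_pySetD]

-- pointwise effect of A's inner index loop: +1 at the (unique) index matching word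
theorem getA (word : String) (unique : List String) :
    ∀ (m : Nat) (coords : List Int) (j : Nat), j < coords.length →
      ((PySem.List.pyRange 0 (m : Int) 1).foldl (fun coords i =>
        if word = PySem.List.pyGetD unique i "" then
          PySem.List.pySetD coords i (PySem.List.pyGetD coords i 0 + 1)
        else coords) coords).getD j 0
      = coords.getD j 0 + (if j < m ∧ word = unique.getD j "" then 1 else 0) := by
  intro m
  induction m with
  | zero =>
    intro coords j hj
    simp [PySem.List.pyRange_one_eq_nil]
  | succ m ih =>
    intro coords j hj
    have hm : ((m : Int) + 1) = ((m + 1 : Nat) : Int) := by push_cast; ring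
    rw [← hm, PySem.List.pyRange_one_succ_right (by positivity), List.foldl_append]
    set r := (PySem.List.pyRange 0 (m : Int) 1).foldl (fun coords i =>
        if word = PySem.List.pyGetD unique i "" then
          PySem.List.pySetD coords i (PySem.List.pyGetD coords i 0 + 1)
        else coords) coords with hr
    have hlen : r.length = coords.length := lenA word unique _ _
    have hrj := ih coords j hj
    simp only [List.foldl_cons, List.foldl_nil]
    by_cases hw : word = PySem.List.pyGetD unique (m : Int) ""
    · rw [if_pos hw]
      have hw' : word = unique.getD m "" := by
        simpa [PySem.List.pyGetD_natCast] using hw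
      simp only [PySem.List.pySetD_natCast, PySem.List.pyGetD_natCast]
      rw [List.getD_eq_getElem?_getD, List.getElem?_set]
      by_cases hjm : m = j
      · subst hjm
        have hml : m < r.length := by omega
        rw [← hr] at hrj
        simp only [if_pos hml, ite_true, Option.getD_some, hrj]
        simp [hw']
      · simp only [if_neg hjm]
        rw [← List.getD_eq_getElem?_getD, hrj]
        have : (j < m + 1 ∧ word = unique.getD j "") ↔ (j < m ∧ word = unique.getD j "") := by
          constructor
          · rintro ⟨h1, h2⟩
            refine ⟨?_, h2⟩
            rcases Nat.lt_succ_iff_lt_or_eq.mp h1 with h | h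
            · exact h
            · exact absurd h.symm hjm
          · rintro ⟨h1, h2⟩; exact ⟨by omega, h2⟩
        rw [if_congr this rfl rfl]
    · rw [if_neg hw]
      have hw' : ¬ word = unique.getD m "" := by
        simpa [PySem.List.pyGetD_natCast] using hw
      rw [hrj]
      congr 1
      by_cases hjm : j = m
      · subst hjm
        have hw2 : ¬ word = unique[j]?.getD "" := by
          simpa [List.getD_eq_getElem?_getD] using hw'
        simp [List.getD_eq_getElem?_getD, hw2]
      · have : j < m + 1 ↔ j < m := by omega
        rw [if_congr (and_congr this Iff.rfl) rfl rfl]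

-- length is preserved by A's per-sentence word loop
theorem lenWords (unique : List String) :
    ∀ (ws : List String) (coords : List Int),
      (ws.foldl (fun coords word =>
        (PySem.List.pyRange 0 (unique.length : Int) 1).foldl (fun coords i =>
          if word = PySem.List.pyGetD unique i "" then
            PySem.List.pySetD coords i (PySem.List.pyGetD coords i 0 + 1)
          else coords) coords) coords).length = coords.length := by
  intro ws
  induction ws with
  | nil => intro coords; rfl
  | cons w ws ih =>
    intro coords
    simp only [List.foldl_cons]
    rw [ih, lenA]

-- pointwise effect of A's per-sentence word loop: coordinate j counts unique[j] in the sentence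
theorem getWords (unique : List String) :
    ∀ (ws : List String) (coords : List Int) (j : Nat), j < coords.length →
      (ws.foldl (fun coords word =>
        (PySem.List.pyRange 0 (unique.length : Int) 1).foldl (fun coords i =>
          if word = PySem.List.pyGetD unique i "" then
            PySem.List.pySetD coords i (PySem.List.pyGetD coords i 0 + 1)
          else coords) coords) coords).getD j 0
      = coords.getD j 0 + (if j < unique.length then ((ws.count (unique.getD j "")) : Int) else 0) := by
  intro ws
  induction ws with
  | nil => intro coords j hj; split_ifs <;> simp
  | cons w ws ih =>
    intro coords j hj
    simp only [List.foldl_cons]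
    have h1 : j < ((PySem.List.pyRange 0 (unique.length : Int) 1).foldl (fun coords i =>
          if w = PySem.List.pyGetD unique i "" then
            PySem.List.pySetD coords i (PySem.List.pyGetD coords i 0 + 1)
          else coords) coords).length := by rw [lenA]; exact hj
    rw [ih _ j h1, getA w unique unique.length coords j hj]
    have hc : (((w :: ws).count (unique.getD j "") : Nat) : Int) =
        ((ws.count (unique.getD j "") : Nat) : Int) +
          (if w = unique.getD j "" then (1 : Int) else 0) := by
      rw [List.count_cons]
      by_cases h : w = unique.getD j "" <;> simp [h]
    rw [hc]
    by_cases hn : j < unique.length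
    · by_cases hwu : w = unique.getD j ""
      · simp only [hn, hwu, and_true, ite_true]
        ring
      · simp [hn]
        ring
    · simp [hn]

-- B's seen-set vocabulary loop computes A's vocabulary (one sentence; the set mirrors the list)
theorem vocabSentence : ∀ (ws : List String) (u : List String),
    ws.foldl (fun p word =>
      if PySem.Set.contains p.2 word then p
      else (p.1 ++ [word], PySem.Set.add p.2 word)) ((u, u) : List String × PySem.Set String)
    = (ws.foldl (fun u word => if word ∈ u then u else u ++ [word]) u,
       ws.foldl (fun u word => if word ∈ u then u else u ++ [word]) u) := by
  intro ws
  induction ws with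
  | nil => intro u; rfl
  | cons w ws ih =>
    intro u
    simp only [List.foldl_cons]
    by_cases h : w ∈ u
    · have hc : PySem.Set.contains u w = true := by simp [h]
      simp only [hc, if_true, if_pos h]
      exact ih u
    · have hc : ¬ PySem.Set.contains u w = true := by
        simp [h]
      simp only [if_neg hc, if_neg h, PySem.Set.add_of_not_mem h]
      exact ih (u ++ [w])

-- B's seen-set vocabulary loop computes A's vocabulary (all sentences)
theorem vocabText : ∀ (tss : List (List String)) (u : List String),
    tss.foldl (fun p sentence => sentence.foldl (fun p word =>
      if PySem.Set.contains p.2 word then p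
      else (p.1 ++ [word], PySem.Set.add p.2 word)) p) ((u, u) : List String × PySem.Set String)
    = (tss.foldl (fun u sentence =>
        sentence.foldl (fun u word => if word ∈ u then u else u ++ [word]) u) u,
       tss.foldl (fun u sentence =>
        sentence.foldl (fun u word => if word ∈ u then u else u ++ [word]) u) u) := by
  intro tss
  induction tss with
  | nil => intro u; rfl
  | cons ws tss ih =>
    intro u
    simp only [List.foldl_cons]
    rw [vocabSentence]
    exact ih _

-- A's per-sentence vector is the vocabulary mapped through the sentence's word counts
theorem sentenceA (unique : List String) (ws : List String) :
    (ws.foldl (fun coords word =>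
      (PySem.List.pyRange 0 (unique.length : Int) 1).foldl (fun coords i =>
        if word = PySem.List.pyGetD unique i "" then
          PySem.List.pySetD coords i (PySem.List.pyGetD coords i 0 + 1)
        else coords) coords) (List.replicate unique.length (0 : Int)))
    = unique.map (fun w => ((ws.count w : Nat) : Int)) := by
  apply List.ext_getElem
  · rw [lenWords]; simp
  · intro j hj hj2
    have hjlen : j < (List.replicate unique.length (0 : Int)).length := by
      rw [List.length_replicate]; rw [lenWords, List.length_replicate] at hj; exact hj
    have hju : j < unique.length := by simpa using hjlen
    have := getWords unique ws (List.replicate unique.length (0 : Int)) j hjlen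
    rw [List.getD_eq_getElem _ _ hj] at this
    rw [this]
    simp [hju]

-- B's per-sentence vector is the same map (frequency dict = sentence count)
theorem sentenceB (unique : List String) (ws : List String) :
    (unique.map (fun w => PySem.Dict.getD
        (ws.foldl (fun d word => PySem.Dict.modify d word 0 (· + 1))
          (PySem.Dict.empty : PySem.Dict String Int)) w 0))
    = unique.map (fun w => ((ws.count w : Nat) : Int)) := by
  apply List.map_congr_left
  intro w _
  rw [PySem.Dict.getD_foldl_modify_add_one]
  simp [PySem.Dict.getD_empty]

-- ===== VERDICT (by name: the statement is the Claim_ definition above) =====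
theorem vectorize_words_spec : Claim_equal_vectorize_words := by
  intro text _
  unfold Spec_vectorize_words vectorize_words vectorize_words_alt
  simp only [PySem.List.foldl_append_singleton_eq_map, List.nil_append]
  apply List.map_congr_left
  intro ws _
  rw [sentenceA, sentenceB]
  rw [show (([], PySem.Set.empty) : List String × PySem.Set String)
        = (([] : List String), ([] : PySem.Set String)) from rfl, vocabText]
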